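-- pv_equiv track=rewrite | github.com/snedea/ArcaneAuditor | parser/pmd_preprocessor.py | _preprocess_newlines_in_script_blocks
-- ===== SOURCE A (Python) =====
-- def _preprocess_newlines_in_script_blocks(code: str) -> str:
--     """
--     Preprocess newlines in PMD script blocks (<% %>) to make them JSON-safe.
--     This handles the case where JSON contains PMD script blocks with literal newlines.
--     """
--     result = []
--     i = 0
--
--     while i < len(code):
--         # Look for PMD script block start
--         if code[i:i+2] == '<%':
--             # Find the end of the script block
--             end_pos = code.find('%>', i + 2)
--             if end_pos == -1:
--                 # Unclosed script block, just append the rest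
--                 result.append(code[i:])
--                 break
--
--             # Extract the script block content (without <% and %>)
--             script_content = code[i+2:end_pos]
--
--             # Replace newlines in the script content with \n
--             escaped_content = script_content.replace('\n', '\\n').replace('\r', '\\r')
--
--             # Add the processed script block
--             result.append('<%' + escaped_content + '%>')
--
--             # Move past the script block
--             i = end_pos + 2
--         else:
--             result.append(code[i])
--             i += 1
--
--     return ''.join(result)
-- ===== SOURCE B (Python) =====
-- def _preprocess_newlines_in_script_blocks(code: str) -> str:
--     """Chunk-wise rewrite: repeatedly partition on '<%' / '%>' instead of
--     scanning character by character; newline escaping done via str.translate."""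
--     table = {10: '\\n', 13: '\\r'}
--     out = []
--     rest = code
--     while True:
--         pre, sep, rest = rest.partition('<%')
--         out.append(pre)
--         if not sep:
--             return ''.join(out)
--         body, sep2, rest = rest.partition('%>')
--         if not sep2:
--             return ''.join(out) + '<%' + body
--         out.append('<%' + body.translate(table) + '%>')
-- ===== Notes on version B (the rewrite author's own statement) =====
-- stated objective: faster
-- what changed: Replaces A's index-driven per-character while loop (appending one character at a time and slicing by index) with a chunk-wise loop that repeatedly partitions the remaining string at the opening and closing block delimiters, escaping block bodies in one pass via str.translate instead of two chained str.replace calls.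
import Mathlib
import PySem

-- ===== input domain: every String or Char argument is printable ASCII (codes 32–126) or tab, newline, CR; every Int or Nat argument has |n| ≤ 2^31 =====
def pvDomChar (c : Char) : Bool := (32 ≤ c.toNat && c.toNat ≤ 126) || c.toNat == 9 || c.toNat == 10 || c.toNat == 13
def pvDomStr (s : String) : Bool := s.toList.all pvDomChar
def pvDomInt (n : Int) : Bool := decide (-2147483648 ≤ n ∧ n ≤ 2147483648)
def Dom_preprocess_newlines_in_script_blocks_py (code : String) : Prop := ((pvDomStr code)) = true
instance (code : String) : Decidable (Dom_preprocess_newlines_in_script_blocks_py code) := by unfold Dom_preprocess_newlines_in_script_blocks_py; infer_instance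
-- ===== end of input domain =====

-- B replaces A's index-driven per-character scan by a chunk-wise partition loop with a
-- single-pass per-character escape (measured faster in a timing run; return value only).

-- ===== PORT A =====
-- A's escape: script.replace('\n','\\n').replace('\r','\\r'), via PySem.Chars.replace.
def escapeA (cs : List Char) : List Char :=
  PySem.Chars.replace (PySem.Chars.replace cs ['\n'] ['\\', 'n']) ['\r'] ['\\', 'r']

-- A's while loop over index i, transcribed as recursion on the suffix code[i:];
-- code.find('%>', i+2) becomes Chars.find on the suffix after '<%' (relative index).
def loopA : List Char → List Char
  | [] => []
  | '<' :: '%' :: rest =>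
      let j := PySem.Chars.find rest ['%', '>']
      if j = -1 then
        '<' :: '%' :: rest                                   -- unclosed: append the rest
      else
        '<' :: '%' :: escapeA (rest.take j.toNat) ++ '%' :: '>' :: loopA (rest.drop (j.toNat + 2))
  | c :: rest => c :: loopA rest
termination_by cs => cs.length
decreasing_by all_goals simp [List.length_drop] <;> omega

def preprocess_newlines_in_script_blocks_py (code : String) : String :=
  String.ofList (loopA code.toList)

-- ===== PORT B =====
-- Source B's str.partition(sep) for the two-char separators, hand-ported (first match).
def partLT : List Char → List Char × Option (List Char)
  | [] => ([], none)
  | '<' :: '%' :: rest => ([], some rest)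
  | c :: rest => let (pre, r) := partLT rest; (c :: pre, r)

def partPct : List Char → List Char × Option (List Char)
  | [] => ([], none)
  | '%' :: '>' :: rest => ([], some rest)
  | c :: rest => let (pre, r) := partPct rest; (c :: pre, r)

-- Source B's body.translate({10:'\\n', 13:'\\r'}), per-character.
def escapeB (cs : List Char) : List Char :=
  cs.flatMap fun c =>
    if c = '\n' then ['\\', 'n'] else if c = '\r' then ['\\', 'r'] else [c]

theorem partLT_some_len : ∀ (cs pre r : List Char), partLT cs = (pre, some r) → r.length + 2 ≤ cs.length := by
  intro cs
  induction cs with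
  | nil => intro pre r h; simp [partLT] at h
  | cons c rest ih =>
      intro pre r h
      rw [partLT.eq_def] at h
      split at h
      · simp at h
      · rename_i rest' heq
        injection heq with e1 e2
        subst e2
        simp at h
        obtain ⟨-, h2⟩ := h
        subst h2
        simp
      · rename_i hne heq
        injection heq with e1 e2
        subst e1
        subst e2
        rcases hp : partLT rest with ⟨pre', r'⟩
        rw [hp] at h
        injection h with _h1 h2
        subst h2
        have := ih pre' r hp
        simp
        omega

theorem partPct_some_len : ∀ (cs pre r : List Char), partPct cs = (pre, some r) → r.length + 2 ≤ cs.length := by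
  intro cs
  induction cs with
  | nil => intro pre r h; simp [partPct] at h
  | cons c rest ih =>
      intro pre r h
      rw [partPct.eq_def] at h
      split at h
      · simp at h
      · rename_i rest' heq
        injection heq with e1 e2
        subst e2
        simp at h
        obtain ⟨-, h2⟩ := h
        subst h2
        simp
      · rename_i hne heq
        injection heq with e1 e2
        subst e1
        subst e2
        rcases hp : partPct rest with ⟨pre', r'⟩
        rw [hp] at h
        injection h with _h1 h2
        subst h2
        have := ih pre' r hp
        simp
        omega

def loopB (cs : List Char) : List Char :=
  match h1 : partLT cs with
  | (pre, none) => pre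
  | (pre, some r) =>
    match h2 : partPct r with
    | (body, none) => pre ++ '<' :: '%' :: body
    | (body, some rest2) => pre ++ '<' :: '%' :: escapeB body ++ '%' :: '>' :: loopB rest2
termination_by cs.length
decreasing_by
  have ha := partLT_some_len cs pre r h1
  have hb := partPct_some_len r body rest2 h2
  omega

def preprocess_newlines_in_script_blocks_py_alt (code : String) : String :=
  String.ofList (loopB code.toList)

-- ===== PRECONDITION & SPEC =====
def Spec_preprocess_newlines_in_script_blocks_py (code : String) (out : String) : Prop := out = preprocess_newlines_in_script_blocks_py_alt code
instance (code : String) (out : String) : Decidable (Spec_preprocess_newlines_in_script_blocks_py code out) := by unfold Spec_preprocess_newlines_in_script_blocks_py; infer_instance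

-- ===== CLAIM (what is proved, stated in full; the proofs are below) =====
def Claim_equal_preprocess_newlines_in_script_blocks_py : Prop := ∀ (code : String), Dom_preprocess_newlines_in_script_blocks_py code → Spec_preprocess_newlines_in_script_blocks_py code (preprocess_newlines_in_script_blocks_py code)

-- ===== LEMMAS AND PROOFS =====

-- `find.go` with a shifted counter.
theorem findgo_succ (sub : List Char) (hsub : sub ≠ []) :
    ∀ (l : List Char) (k : Nat), PySem.Chars.find.go sub l (k+1) =
      (if PySem.Chars.find.go sub l k = -1 then -1 else PySem.Chars.find.go sub l k + 1) := by
  intro l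
  induction l with
  | nil => intro k; simp [PySem.Chars.find.go, List.isEmpty_iff, hsub]
  | cons c t ih =>
      intro k
      simp only [PySem.Chars.find.go]
      by_cases hp : sub.isPrefixOf (c :: t) = true
      · simp [hp]
      · simp [hp, ih (k+1)]

-- `find` is -1 or nonnegative.
theorem find_neg_or_nonneg (sub : List Char) (hsub : sub ≠ []) :
    ∀ (l : List Char), PySem.Chars.find l sub = -1 ∨ 0 ≤ PySem.Chars.find l sub := by
  intro l
  unfold PySem.Chars.find
  induction l with
  | nil => simp [PySem.Chars.find.go, List.isEmpty_iff, hsub]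
  | cons c t ih =>
      simp only [PySem.Chars.find.go]
      by_cases hp : sub.isPrefixOf (c :: t) = true
      · simp [hp]
      · simp only [hp, Bool.false_eq_true, if_false]
        rw [show (0:Nat) + 1 = 0 + 1 from rfl, findgo_succ sub hsub t 0]
        rcases ih with h | h
        · left; simp [h]
        · right; split <;> omega

-- cons equations for `find`.
theorem find_cons_prefix (sub c t) (hp : sub.isPrefixOf (c :: t) = true) :
    PySem.Chars.find (c :: t) sub = 0 := by
  unfold PySem.Chars.find
  simp [PySem.Chars.find.go, hp]

theorem find_cons_not_prefix (sub c t) (hsub : sub ≠ []) (hp : ¬ sub.isPrefixOf (c :: t) = true) :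
    PySem.Chars.find (c :: t) sub =
      (if PySem.Chars.find t sub = -1 then -1 else PySem.Chars.find t sub + 1) := by
  unfold PySem.Chars.find
  simp only [PySem.Chars.find.go, hp, Bool.false_eq_true, if_false]
  exact findgo_succ sub hsub t 0

-- partPct computes exactly what A's `code.find('%>', …)` + slicing computes.
theorem partPct_eq_find : ∀ (cs : List Char),
    partPct cs =
      (if PySem.Chars.find cs ['%', '>'] = -1 then (cs, none)
       else (cs.take (PySem.Chars.find cs ['%', '>']).toNat,
             some (cs.drop ((PySem.Chars.find cs ['%', '>']).toNat + 2)))) := by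
  intro cs
  induction cs with
  | nil =>
      simp [partPct, PySem.Chars.find, PySem.Chars.find.go]
  | cons c rest ih =>
      rw [partPct.eq_def]
      split
      · simp at *
      · rename_i rest' heq
        injection heq with e1 e2
        subst e1; subst e2
        rw [find_cons_prefix ['%','>'] '%' ('>' :: rest') (by simp [List.isPrefixOf])]
        simp
      · rename_i hne heq
        injection heq with e1 e2
        subst e1; subst e2
        have hnp : ¬ (['%','>'].isPrefixOf (c :: rest)) = true := by
          intro hcontr
          cases rest with
          | nil => simp [List.isPrefixOf] at hcontr
          | cons d t =>
              simp [List.isPrefixOf] at hcontr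
              obtain ⟨h1, h2⟩ := hcontr
              subst h1; subst h2
              exact hne t rfl rfl
        rw [find_cons_not_prefix ['%','>'] c rest (by simp) hnp]
        rw [ih]
        rcases find_neg_or_nonneg ['%','>'] (by simp) rest with h | h
        · simp [h]
        · have hne1 : PySem.Chars.find rest ['%','>'] ≠ -1 := by omega
          simp only [hne1, if_false, if_neg (by omega : ¬ (PySem.Chars.find rest ['%','>'] + 1 = -1))]
          have ht : (PySem.Chars.find rest ['%','>'] + 1).toNat
              = (PySem.Chars.find rest ['%','>']).toNat + 1 := by omega
          simp [ht]

-- evaluation lemmas for loopB, driven by what the two partitions return.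
theorem loopB_none (cs pre : List Char) (h : partLT cs = (pre, none)) :
    loopB cs = pre := by
  rw [loopB.eq_def]
  split <;> rename_i heq <;> rw [h] at heq
  · injection heq with e1 e2; subst e1; rfl
  · injection heq with e1 e2; simp at e2

theorem loopB_some_none (cs pre r body : List Char)
    (h1 : partLT cs = (pre, some r)) (h2 : partPct r = (body, none)) :
    loopB cs = pre ++ '<' :: '%' :: body := by
  rw [loopB.eq_def]
  split <;> rename_i heq <;> rw [h1] at heq
  · injection heq with e1 e2; simp at e2
  · injection heq with e1 e2
    injection e2 with e2
    subst e1; subst e2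
    split <;> rename_i heq2 <;> rw [h2] at heq2
    · injection heq2 with f1 f2; subst f1; rfl
    · injection heq2 with f1 f2; simp at f2

theorem loopB_some_some (cs pre r body rest2 : List Char)
    (h1 : partLT cs = (pre, some r)) (h2 : partPct r = (body, some rest2)) :
    loopB cs = pre ++ '<' :: '%' :: (escapeB body ++ '%' :: '>' :: loopB rest2) := by
  rw [loopB.eq_def]
  split <;> rename_i heq <;> rw [h1] at heq
  · injection heq with e1 e2; simp at e2
  · injection heq with e1 e2
    injection e2 with e2
    subst e1; subst e2
    split <;> rename_i heq2 <;> rw [h2] at heq2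
    · injection heq2 with f1 f2; simp at f2
    · injection heq2 with f1 f2
      injection f2 with f2
      subst f1; subst f2; simp

-- partLT on a list not starting with '<%' conses the head onto partLT of the tail.
theorem partLT_cons (c : Char) (rest : List Char)
    (h : ∀ r, ¬ (c = '<' ∧ rest = '%' :: r)) :
    partLT (c :: rest) = ((c :: (partLT rest).1, (partLT rest).2)) := by
  rw [partLT.eq_def]
  split
  · rename_i heq; injection heq
  · rename_i rest' heq
    injection heq with e1 e2
    exact absurd ⟨e1, e2⟩ (h rest')
  · rename_i hne heq
    injection heq with e1 e2
    subst e1; subst e2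
    rcases hp : partLT rest with ⟨pre', r'⟩
    simp

-- loopB skips a head character that does not open a block.
theorem loopB_cons (c : Char) (rest : List Char)
    (h : ∀ r, ¬ (c = '<' ∧ rest = '%' :: r)) :
    loopB (c :: rest) = c :: loopB rest := by
  have hc := partLT_cons c rest h
  rcases hp : partLT rest with ⟨pre, r?⟩
  rw [hp] at hc
  cases r? with
  | none => rw [loopB_none _ _ hc, loopB_none _ _ hp]
  | some r =>
      rcases hq : partPct r with ⟨body, r2?⟩
      cases r2? with
      | none => rw [loopB_some_none _ _ _ _ hc hq, loopB_some_none _ _ _ _ hp hq]; rfl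
      | some rest2 => rw [loopB_some_some _ _ _ _ _ hc hq, loopB_some_some _ _ _ _ _ hp hq]; rfl

-- loopB on a block opener: partition the remainder at the first '%>'.
theorem loopB_block_unclosed (rest body : List Char) (h : partPct rest = (body, none)) :
    loopB ('<' :: '%' :: rest) = '<' :: '%' :: body := by
  rw [loopB_some_none ('<' :: '%' :: rest) [] rest body rfl h]; rfl

theorem loopB_block_closed (rest body rest2 : List Char) (h : partPct rest = (body, some rest2)) :
    loopB ('<' :: '%' :: rest) = '<' :: '%' :: (escapeB body ++ '%' :: '>' :: loopB rest2) := by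
  rw [loopB_some_some ('<' :: '%' :: rest) [] rest body rest2 rfl h]; rfl

-- single-character replace is a per-character flatMap.
theorem replacego_single (a : Char) (new : List Char) :
    ∀ (l : List Char) (fuel : Nat) (acc : List Char), l.length ≤ fuel →
      PySem.Chars.replace.go [a] new fuel l acc =
        acc.reverse ++ l.flatMap (fun c => if c = a then new else [c]) := by
  intro l
  induction l with
  | nil =>
      intro fuel acc _
      cases fuel <;> simp [PySem.Chars.replace.go]
  | cons c t ih =>
      intro fuel acc hf
      cases fuel with
      | zero => simp at hf
      | succ f =>
          by_cases hc : c = a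
          · subst hc
            rw [show PySem.Chars.replace.go [c] new (f+1) (c :: t) acc
                  = PySem.Chars.replace.go [c] new f t (new.reverse ++ acc) from by
                simp [PySem.Chars.replace.go, List.isPrefixOf]]
            rw [ih f (new.reverse ++ acc) (by simp at hf; omega)]
            simp
          · have hac : ¬ a = c := fun h' => hc h'.symm
            rw [show PySem.Chars.replace.go [a] new (f+1) (c :: t) acc
                  = PySem.Chars.replace.go [a] new f t (c :: acc) from by
                simp [PySem.Chars.replace.go, List.isPrefixOf, hac]]
            rw [ih f (c :: acc) (by simp at hf; omega)]
            simp [hc]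

theorem replace_single (a : Char) (new : List Char) (l : List Char) :
    PySem.Chars.replace l [a] new = l.flatMap (fun c => if c = a then new else [c]) := by
  unfold PySem.Chars.replace
  simp only [List.isEmpty_cons, Bool.false_eq_true, if_false]
  simpa using replacego_single a new l l.length [] le_rfl

-- A's two-step replace equals B's one-pass translate.
theorem escapeA_eq_escapeB (cs : List Char) : escapeA cs = escapeB cs := by
  unfold escapeA escapeB
  rw [replace_single '\n' ['\\', 'n'] cs]
  rw [replace_single '\r' ['\\', 'r']]
  induction cs with
  | nil => rfl
  | cons c t ih =>
      simp only [List.flatMap_cons, List.flatMap_append, ih]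
      congr 1
      by_cases h1 : c = '\n'
      · subst h1; decide
      · by_cases h2 : c = '\r'
        · subst h2; decide
        · simp [h1, h2]

theorem loopA_cons (c : Char) (rest : List Char)
    (h : ∀ r, c = '<' → rest = '%' :: r → False) :
    loopA (c :: rest) = c :: loopA rest := by
  rw [loopA.eq_def]
  split
  · rename_i heq; injection heq
  · rename_i rest' heq
    injection heq with e1 e2
    exact absurd e2 (fun hh => h rest' e1 hh)
  · rename_i hne heq
    injection heq with e1 e2
    subst e1; subst e2; rfl

theorem loopA_eq_loopB : ∀ cs, loopA cs = loopB cs := by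
  intro cs
  induction cs using loopA.induct with
  | case1 =>
      rw [loopB_none [] [] rfl]
      simp [loopA]
  | case2 rest j hj =>
      have hj' : PySem.Chars.find rest ['%', '>'] = -1 := hj
      rw [loopB_block_unclosed rest rest (by rw [partPct_eq_find]; simp [hj'])]
      simp [loopA, hj']
  | case3 rest j hj ih =>
      have hj' : ¬ PySem.Chars.find rest ['%', '>'] = -1 := hj
      have ih' : loopA (rest.drop ((PySem.Chars.find rest ['%', '>']).toNat + 2))
          = loopB (rest.drop ((PySem.Chars.find rest ['%', '>']).toNat + 2)) := ih
      have hpct : partPct rest =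
          ((rest.take (PySem.Chars.find rest ['%', '>']).toNat),
           some (rest.drop ((PySem.Chars.find rest ['%', '>']).toNat + 2))) := by
        rw [partPct_eq_find]; simp [hj']
      rw [loopB_block_closed _ _ _ hpct]
      rw [loopA.eq_def]
      simp only [hj', if_false]
      rw [escapeA_eq_escapeB, ih']
      simp
  | case4 c rest h ih =>
      rw [loopA_cons c rest h, loopB_cons c rest (fun r hr => h r hr.1 hr.2), ih]

-- ===== VERDICT (by name: the statement is the Claim_ definition above) =====
theorem preprocess_newlines_in_script_blocks_py_spec : Claim_equal_preprocess_newlines_in_script_blocks_py := by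
  intro code _
  unfold Spec_preprocess_newlines_in_script_blocks_py preprocess_newlines_in_script_blocks_py preprocess_newlines_in_script_blocks_py_alt
  rw [loopA_eq_loopB]
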